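-- pv_equiv track=rewrite | github.com/Shakileash5/leetCode | next-permutation.py | nextMaxim
-- ===== SOURCE A (Python) =====
-- def nextMaxim(nums,ind,curr):
--     index = 0
--     maxi = -1
--
--     for i in range(ind,len(nums)):
--         if nums[i]>curr:
--             if maxi == -1:
--                 maxi = curr
--                 index = i
--             else:
--                 maxi = min(nums[i],maxi)
--                 index = i
--     return index
-- ===== SOURCE B (Python) =====
-- def nextMaxim(nums, ind, curr):
--     # Reverse scan with early exit: return the last index i in range(ind, len(nums))
--     # with nums[i] > curr, else 0. No running index/maxi state.
--     for i in reversed(range(ind, len(nums))):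
--         if nums[i] > curr:
--             return i
--     return 0
-- ===== Notes on version B (the rewrite author's own statement) =====
-- stated objective: simpler
-- what changed: Replaced the forward scan that keeps index/maxi accumulator state with a stateless reverse scan that returns the first (i.e. last-in-order) index with nums[i] > curr immediately, defaulting to 0.
import Mathlib
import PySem

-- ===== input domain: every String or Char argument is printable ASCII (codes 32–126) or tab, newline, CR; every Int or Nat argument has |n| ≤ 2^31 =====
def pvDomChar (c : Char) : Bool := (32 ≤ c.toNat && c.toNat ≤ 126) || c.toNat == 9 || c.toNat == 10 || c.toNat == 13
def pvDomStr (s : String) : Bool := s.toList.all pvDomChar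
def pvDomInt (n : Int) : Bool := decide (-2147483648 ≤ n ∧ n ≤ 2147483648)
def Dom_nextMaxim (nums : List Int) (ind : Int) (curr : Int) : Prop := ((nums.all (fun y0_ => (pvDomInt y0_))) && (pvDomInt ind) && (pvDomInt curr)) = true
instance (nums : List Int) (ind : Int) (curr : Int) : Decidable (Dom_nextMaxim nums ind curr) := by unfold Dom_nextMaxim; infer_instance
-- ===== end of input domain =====

-- B replaces A's stateful forward scan by a stateless reverse scan with early exit (objective: simpler).

-- ===== PORT A =====
-- forward loop over range(ind, len(nums)) carrying (index, maxi); nums[i] via pyGet? (getD 0 is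
-- unreachable inside Pre_, where every index of the range is valid)
def nextMaxim (nums : List Int) (ind : Int) (curr : Int) : Int :=
  ((PySem.List.pyRange ind (nums.length : Int) 1).foldl
    (fun (st : Int × Int) i =>
      if (PySem.List.pyGet? nums i).getD 0 > curr then
        if st.2 == -1 then (i, curr)
        else (i, min ((PySem.List.pyGet? nums i).getD 0) st.2)
      else st)
    (0, -1)).1

-- ===== PORT B =====
-- reverse scan, first match returned immediately, default 0
def nextMaximAltLoop (nums : List Int) (curr : Int) : List Int → Int
  | [] => 0
  | i :: rest =>
    if (PySem.List.pyGet? nums i).getD 0 > curr then i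
    else nextMaximAltLoop nums curr rest

def nextMaxim_alt (nums : List Int) (ind : Int) (curr : Int) : Int :=
  nextMaximAltLoop nums curr ((PySem.List.pyRange ind (nums.length : Int) 1).reverse)

-- ===== PRECONDITION & SPEC =====
-- Pre_ excludes exactly the inputs where A raises IndexError: an index below -len(nums)
-- makes range(ind, len(nums)) start at a position where nums[i] is out of range.
def Pre_nextMaxim (nums : List Int) (ind : Int) (curr : Int) : Prop :=
  -(nums.length : Int) ≤ ind
instance (nums : List Int) (ind : Int) (curr : Int) : Decidable (Pre_nextMaxim nums ind curr) := by
  unfold Pre_nextMaxim; infer_instance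

def pvWitness_nextMaxim : List Int × Int × Int := ([1, 2, 3], 0, 1)

def Spec_nextMaxim (nums : List Int) (ind : Int) (curr : Int) (out : Int) : Prop := out = nextMaxim_alt nums ind curr
instance (nums : List Int) (ind : Int) (curr : Int) (out : Int) : Decidable (Spec_nextMaxim nums ind curr out) := by unfold Spec_nextMaxim; infer_instance

-- ===== CLAIM (what is proved, stated in full; the proofs are below) =====
def Claim_equal_nextMaxim : Prop := ∀ (nums : List Int) (ind : Int) (curr : Int), Dom_nextMaxim nums ind curr → Pre_nextMaxim nums ind curr → Spec_nextMaxim nums ind curr (nextMaxim nums ind curr)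

-- ===== LEMMAS AND PROOFS =====

-- B's loop is first-match-or-0 over its index list
theorem altLoop_eq_find (nums : List Int) (curr : Int) (l : List Int) :
    nextMaximAltLoop nums curr l
      = (l.find? (fun i => (PySem.List.pyGet? nums i).getD 0 > curr)).getD 0 := by
  induction l with
  | nil => rfl
  | cons x rest ih =>
    simp only [nextMaximAltLoop, List.find?]
    by_cases h : (PySem.List.pyGet? nums x).getD 0 > curr
    · simp [h]
    · simp [h, ih]

-- A's fold: its first component is the last match of the index list (first of the reverse),
-- defaulting to the initial index
theorem foldA_fst (nums : List Int) (curr : Int) (l : List Int) (st : Int × Int) :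
    (l.foldl
      (fun (st : Int × Int) i =>
        if (PySem.List.pyGet? nums i).getD 0 > curr then
          if st.2 == -1 then (i, curr)
          else (i, min ((PySem.List.pyGet? nums i).getD 0) st.2)
        else st)
      st).1
      = (l.reverse.find? (fun i => (PySem.List.pyGet? nums i).getD 0 > curr)).getD st.1 := by
  induction l generalizing st with
  | nil => rfl
  | cons x rest ih =>
    simp only [List.foldl_cons, List.reverse_cons, List.find?_append, ih]
    cases hfind : rest.reverse.find? (fun i => (PySem.List.pyGet? nums i).getD 0 > curr) with
    | some j => simp
    | none =>
      simp only [Option.none_or, List.find?]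
      by_cases h : (PySem.List.pyGet? nums x).getD 0 > curr
      · simp [h]; split <;> simp
      · simp [h]

-- ===== VERDICT (by name: the statement is the Claim_ definition above) =====
theorem nextMaxim_spec : Claim_equal_nextMaxim := by
  intro nums ind curr _ _
  unfold Spec_nextMaxim nextMaxim nextMaxim_alt
  rw [foldA_fst, altLoop_eq_find]
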